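-- pv_equiv track=rewrite | github.com/hazemhosny/ArabicDialectClassification | utils.py | emoji_native_translation
-- ===== SOURCE A (Python) =====
-- def emoji_native_translation(text):
--     text = text.lower()
--     loves = ["<3", "♥",'❤']
--     smilefaces = []
--     sadfaces = []
--     neutralfaces = []
--
--     eyes = ["8",":","=",";"]
--     nose = ["'","`","-",r"\\"]
--     for e in eyes:
--         for n in nose:
--             for s in [")", "d", "]", "}","p"]:
--                 smilefaces.append(e+n+s)
--                 smilefaces.append(e+s)
--             for s in ["(", "[", "{"]:
--                 sadfaces.append(e+n+s)
--                 sadfaces.append(e+s)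
--             for s in ["|", "/", r"\\"]:
--                 neutralfaces.append(e+n+s)
--                 neutralfaces.append(e+s)
--             #reversed
--             for s in ["(", "[", "{"]:
--                 smilefaces.append(s+n+e)
--                 smilefaces.append(s+e)
--             for s in [")", "]", "}"]:
--                 sadfaces.append(s+n+e)
--                 sadfaces.append(s+e)
--             for s in ["|", "/", r"\\"]:
--                 neutralfaces.append(s+n+e)
--                 neutralfaces.append(s+e)
--
--     smilefaces = list(set(smilefaces))
--     sadfaces = list(set(sadfaces))
--     neutralfaces = list(set(neutralfaces))
--     t = []
--     for w in text.split():
--         if w in loves: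
--             t.append("حب")
--         elif w in smilefaces:
--             t.append("مضحك")
--         elif w in neutralfaces:
--             t.append("عادي")
--         elif w in sadfaces:
--             t.append("محزن")
--         else:
--             t.append(w)
--     newText = " ".join(t)
--     return newText
-- ===== SOURCE B (Python) =====
-- # B recognizes emoticons structurally (parses eye/nose/mouth) instead of
-- # generating and scanning the full face lists.
-- EYES = {"8", ":", "=", ";"}
-- NOSES = ("'", "`", "-", "\\\\")
-- LOVES = {"<3", "\u2665", "\u2764"}
--
--
-- def _after_optional_nose(s):
--     """All remainders of s after stripping an optional nose prefix."""
--     yield s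
--     for n in NOSES:
--         if s.startswith(n):
--             yield s[len(n):]
--
--
-- def _is_face(w, right_mouths, left_mouths):
--     # forward form: eye [nose] mouth
--     if w[0] in EYES:
--         for rest in _after_optional_nose(w[1:]):
--             if rest in right_mouths:
--                 return True
--     # reversed form: mouth [nose] eye
--     for m in left_mouths:
--         if w.startswith(m):
--             for rest in _after_optional_nose(w[len(m):]):
--                 if rest in EYES:
--                     return True
--     return False
--
--
-- def emoji_native_translation(text):
--     out = []
--     for w in text.lower().split():
--         if w in LOVES:
--             out.append("حب")
--         elif _is_face(w, {")", "d", "]", "}", "p"}, ("(", "[", "{")):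
--             out.append("مضحك")
--         elif _is_face(w, {"|", "/", "\\\\"}, ("|", "/", "\\\\")):
--             out.append("عادي")
--         elif _is_face(w, {"(", "[", "{"}, (")", "]", "}")):
--             out.append("محزن")
--         else:
--             out.append(w)
--     return " ".join(out)
-- ===== Notes on version B (the rewrite author's own statement) =====
-- stated objective: alternative
-- what changed: B recognizes emoticons by parsing each word structurally (eye + optional nose + mouth, or the mirrored mouth + optional nose + eye) against the small eye/nose/mouth alphabets, instead of generating A's ~400 face strings and scanning the generated lists for each word.
import Mathlib
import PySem

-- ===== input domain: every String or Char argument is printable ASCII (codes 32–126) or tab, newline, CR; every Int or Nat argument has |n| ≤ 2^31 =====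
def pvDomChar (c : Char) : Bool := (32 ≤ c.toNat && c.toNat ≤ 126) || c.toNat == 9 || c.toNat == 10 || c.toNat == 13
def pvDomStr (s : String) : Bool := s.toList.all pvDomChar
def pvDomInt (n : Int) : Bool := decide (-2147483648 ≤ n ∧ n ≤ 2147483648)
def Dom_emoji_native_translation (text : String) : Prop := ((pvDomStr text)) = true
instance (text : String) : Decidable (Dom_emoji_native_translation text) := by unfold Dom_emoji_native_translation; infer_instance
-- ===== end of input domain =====

-- B recognizes each word as an emoticon by PARSING it (eye + optional nose + mouth,
-- or the mirrored form) instead of generating the ~400 face strings and scanning them.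

-- ===== PORT A =====
-- tokens are ported as List Char (Python str concatenation = List.append)
def pvLovesA : List (List Char) := [['<', '3'], ['♥'], ['❤']]
def pvEyesA : List (List Char) := [['8'], [':'], ['='], [';']]
def pvNoseA : List (List Char) := [['\''], ['`'], ['-'], ['\\', '\\']]

-- the nested for-loops of A, as a fold over eyes/noses carrying (smilefaces, sadfaces, neutralfaces)
def pvFacesA : List (List Char) × List (List Char) × List (List Char) :=
  pvEyesA.foldl (fun acc e =>
    pvNoseA.foldl (fun acc n =>
      let sm := [[')'], ['d'], [']'], ['}'], ['p']].foldl (fun l s => l ++ [e ++ n ++ s, e ++ s]) acc.1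
      let sa := [['('], ['['], ['{']].foldl (fun l s => l ++ [e ++ n ++ s, e ++ s]) acc.2.1
      let ne := [['|'], ['/'], ['\\', '\\']].foldl (fun l s => l ++ [e ++ n ++ s, e ++ s]) acc.2.2
      -- reversed
      let sm := [['('], ['['], ['{']].foldl (fun l s => l ++ [s ++ n ++ e, s ++ e]) sm
      let sa := [[')'], [']'], ['}']].foldl (fun l s => l ++ [s ++ n ++ e, s ++ e]) sa
      let ne := [['|'], ['/'], ['\\', '\\']].foldl (fun l s => l ++ [s ++ n ++ e, s ++ e]) ne
      (sm, sa, ne)) acc) ([], [], [])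

-- list(set(...)) : membership-only use, so PySem.Set is exact here
def pvSmileA : PySem.Set (List Char) := PySem.Set.ofList pvFacesA.1
def pvSadA : PySem.Set (List Char) := PySem.Set.ofList pvFacesA.2.1
def pvNeutralA : PySem.Set (List Char) := PySem.Set.ofList pvFacesA.2.2

-- the body of A's per-word loop
def pvTransA (w : String) : String :=
  if pvLovesA.contains w.toList then "حب"
  else if pvSmileA.contains w.toList then "مضحك"
  else if pvNeutralA.contains w.toList then "عادي"
  else if pvSadA.contains w.toList then "محزن"
  else w

def emoji_native_translation (text : String) : String :=
  PySem.Str.join " " ((PySem.Str.split₀ (PySem.Str.lower text)).map pvTransA)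

-- ===== PORT B =====
-- Source B's module constants
def pvEyesB : List Char := ['8', ':', '=', ';']          -- EYES, a set of 1-char strings
def pvNosesB : List (List Char) := [['\''], ['`'], ['-'], ['\\', '\\']]   -- NOSES
def pvLovesB : List (List Char) := [['<', '3'], ['♥'], ['❤']]                -- LOVES
def pvEyeToksB : List (List Char) := [['8'], [':'], ['='], [';']]            -- EYES, matched as whole strings

-- _after_optional_nose: the remainders of s after an optional nose prefix, in generator order
def pvAfterNose (s : List Char) : List (List Char) :=
  s :: pvNosesB.filterMap (fun n => if n.isPrefixOf s then some (s.drop n.length) else none)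

-- _is_face: forward form eye [nose] mouth, or mirrored form mouth [nose] eye
def pvIsFace (w : List Char) (right left : List (List Char)) : Bool :=
  (match w with
   | [] => false     -- w[0]: split() never yields an empty word
   | c :: body => pvEyesB.contains c && (pvAfterNose body).any (fun r => right.contains r))
  || left.any (fun m => m.isPrefixOf w
       && (pvAfterNose (w.drop m.length)).any (fun r => pvEyeToksB.contains r))

def pvSmileR : List (List Char) := [[')'], ['d'], [']'], ['}'], ['p']]
def pvSmileL : List (List Char) := [['('], ['['], ['{']]
def pvNeutM  : List (List Char) := [['|'], ['/'], ['\\', '\\']]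
def pvSadR   : List (List Char) := [['('], ['['], ['{']]
def pvSadL   : List (List Char) := [[')'], [']'], ['}']]

-- the body of Source B's per-word loop
def pvTransB (w : String) : String :=
  if pvLovesB.contains w.toList then "حب"
  else if pvIsFace w.toList pvSmileR pvSmileL then "مضحك"
  else if pvIsFace w.toList pvNeutM pvNeutM then "عادي"
  else if pvIsFace w.toList pvSadR pvSadL then "محزن"
  else w

def emoji_native_translation_alt (text : String) : String :=
  PySem.Str.join " " ((PySem.Str.split₀ (PySem.Str.lower text)).map pvTransB)

-- ===== PRECONDITION & SPEC =====
def Spec_emoji_native_translation (text : String) (out : String) : Prop := out = emoji_native_translation_alt text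
instance (text : String) (out : String) : Decidable (Spec_emoji_native_translation text out) := by unfold Spec_emoji_native_translation; infer_instance

-- ===== CLAIM (what is proved, stated in full; the proofs are below) =====
def Claim_equal_emoji_native_translation : Prop := ∀ (text : String), Dom_emoji_native_translation text → Spec_emoji_native_translation text (emoji_native_translation text)

-- ===== LEMMAS AND PROOFS =====

def pvLitSmile : List (List Char) :=
 [['8', '\'', ')'],
  ['8', ')'],
  ['8', '\'', 'd'],
  ['8', 'd'],
  ['8', '\'', ']'],
  ['8', ']'],
  ['8', '\'', '}'],
  ['8', '}'],
  ['8', '\'', 'p'],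
  ['8', 'p'],
  ['(', '\'', '8'],
  ['(', '8'],
  ['[', '\'', '8'],
  ['[', '8'],
  ['{', '\'', '8'],
  ['{', '8'],
  ['8', '`', ')'],
  ['8', '`', 'd'],
  ['8', '`', ']'],
  ['8', '`', '}'],
  ['8', '`', 'p'],
  ['(', '`', '8'],
  ['[', '`', '8'],
  ['{', '`', '8'],
  ['8', '-', ')'],
  ['8', '-', 'd'],
  ['8', '-', ']'],
  ['8', '-', '}'],
  ['8', '-', 'p'],
  ['(', '-', '8'],
  ['[', '-', '8'],
  ['{', '-', '8'],
  ['8', '\\', '\\', ')'],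
  ['8', '\\', '\\', 'd'],
  ['8', '\\', '\\', ']'],
  ['8', '\\', '\\', '}'],
  ['8', '\\', '\\', 'p'],
  ['(', '\\', '\\', '8'],
  ['[', '\\', '\\', '8'],
  ['{', '\\', '\\', '8'],
  [':', '\'', ')'],
  [':', ')'],
  [':', '\'', 'd'],
  [':', 'd'],
  [':', '\'', ']'],
  [':', ']'],
  [':', '\'', '}'],
  [':', '}'],
  [':', '\'', 'p'],
  [':', 'p'],
  ['(', '\'', ':'],
  ['(', ':'],
  ['[', '\'', ':'],
  ['[', ':'],
  ['{', '\'', ':'],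
  ['{', ':'],
  [':', '`', ')'],
  [':', '`', 'd'],
  [':', '`', ']'],
  [':', '`', '}'],
  [':', '`', 'p'],
  ['(', '`', ':'],
  ['[', '`', ':'],
  ['{', '`', ':'],
  [':', '-', ')'],
  [':', '-', 'd'],
  [':', '-', ']'],
  [':', '-', '}'],
  [':', '-', 'p'],
  ['(', '-', ':'],
  ['[', '-', ':'],
  ['{', '-', ':'],
  [':', '\\', '\\', ')'],
  [':', '\\', '\\', 'd'],
  [':', '\\', '\\', ']'],
  [':', '\\', '\\', '}'],
  [':', '\\', '\\', 'p'],
  ['(', '\\', '\\', ':'],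
  ['[', '\\', '\\', ':'],
  ['{', '\\', '\\', ':'],
  ['=', '\'', ')'],
  ['=', ')'],
  ['=', '\'', 'd'],
  ['=', 'd'],
  ['=', '\'', ']'],
  ['=', ']'],
  ['=', '\'', '}'],
  ['=', '}'],
  ['=', '\'', 'p'],
  ['=', 'p'],
  ['(', '\'', '='],
  ['(', '='],
  ['[', '\'', '='],
  ['[', '='],
  ['{', '\'', '='],
  ['{', '='],
  ['=', '`', ')'],
  ['=', '`', 'd'],
  ['=', '`', ']'],
  ['=', '`', '}'],
  ['=', '`', 'p'],
  ['(', '`', '='],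
  ['[', '`', '='],
  ['{', '`', '='],
  ['=', '-', ')'],
  ['=', '-', 'd'],
  ['=', '-', ']'],
  ['=', '-', '}'],
  ['=', '-', 'p'],
  ['(', '-', '='],
  ['[', '-', '='],
  ['{', '-', '='],
  ['=', '\\', '\\', ')'],
  ['=', '\\', '\\', 'd'],
  ['=', '\\', '\\', ']'],
  ['=', '\\', '\\', '}'],
  ['=', '\\', '\\', 'p'],
  ['(', '\\', '\\', '='],
  ['[', '\\', '\\', '='],
  ['{', '\\', '\\', '='],
  [';', '\'', ')'],
  [';', ')'],
  [';', '\'', 'd'],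
  [';', 'd'],
  [';', '\'', ']'],
  [';', ']'],
  [';', '\'', '}'],
  [';', '}'],
  [';', '\'', 'p'],
  [';', 'p'],
  ['(', '\'', ';'],
  ['(', ';'],
  ['[', '\'', ';'],
  ['[', ';'],
  ['{', '\'', ';'],
  ['{', ';'],
  [';', '`', ')'],
  [';', '`', 'd'],
  [';', '`', ']'],
  [';', '`', '}'],
  [';', '`', 'p'],
  ['(', '`', ';'],
  ['[', '`', ';'],
  ['{', '`', ';'],
  [';', '-', ')'],
  [';', '-', 'd'],
  [';', '-', ']'],
  [';', '-', '}'],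
  [';', '-', 'p'],
  ['(', '-', ';'],
  ['[', '-', ';'],
  ['{', '-', ';'],
  [';', '\\', '\\', ')'],
  [';', '\\', '\\', 'd'],
  [';', '\\', '\\', ']'],
  [';', '\\', '\\', '}'],
  [';', '\\', '\\', 'p'],
  ['(', '\\', '\\', ';'],
  ['[', '\\', '\\', ';'],
  ['{', '\\', '\\', ';']]

def pvLitSad : List (List Char) :=
 [['8', '\'', '('],
  ['8', '('],
  ['8', '\'', '['],
  ['8', '['],
  ['8', '\'', '{'],
  ['8', '{'],
  [')', '\'', '8'],
  [')', '8'],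
  [']', '\'', '8'],
  [']', '8'],
  ['}', '\'', '8'],
  ['}', '8'],
  ['8', '`', '('],
  ['8', '`', '['],
  ['8', '`', '{'],
  [')', '`', '8'],
  [']', '`', '8'],
  ['}', '`', '8'],
  ['8', '-', '('],
  ['8', '-', '['],
  ['8', '-', '{'],
  [')', '-', '8'],
  [']', '-', '8'],
  ['}', '-', '8'],
  ['8', '\\', '\\', '('],
  ['8', '\\', '\\', '['],
  ['8', '\\', '\\', '{'],
  [')', '\\', '\\', '8'],
  [']', '\\', '\\', '8'],
  ['}', '\\', '\\', '8'],
  [':', '\'', '('],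
  [':', '('],
  [':', '\'', '['],
  [':', '['],
  [':', '\'', '{'],
  [':', '{'],
  [')', '\'', ':'],
  [')', ':'],
  [']', '\'', ':'],
  [']', ':'],
  ['}', '\'', ':'],
  ['}', ':'],
  [':', '`', '('],
  [':', '`', '['],
  [':', '`', '{'],
  [')', '`', ':'],
  [']', '`', ':'],
  ['}', '`', ':'],
  [':', '-', '('],
  [':', '-', '['],
  [':', '-', '{'],
  [')', '-', ':'],
  [']', '-', ':'],
  ['}', '-', ':'],
  [':', '\\', '\\', '('],
  [':', '\\', '\\', '['],
  [':', '\\', '\\', '{'],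
  [')', '\\', '\\', ':'],
  [']', '\\', '\\', ':'],
  ['}', '\\', '\\', ':'],
  ['=', '\'', '('],
  ['=', '('],
  ['=', '\'', '['],
  ['=', '['],
  ['=', '\'', '{'],
  ['=', '{'],
  [')', '\'', '='],
  [')', '='],
  [']', '\'', '='],
  [']', '='],
  ['}', '\'', '='],
  ['}', '='],
  ['=', '`', '('],
  ['=', '`', '['],
  ['=', '`', '{'],
  [')', '`', '='],
  [']', '`', '='],
  ['}', '`', '='],
  ['=', '-', '('],
  ['=', '-', '['],
  ['=', '-', '{'],
  [')', '-', '='],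
  [']', '-', '='],
  ['}', '-', '='],
  ['=', '\\', '\\', '('],
  ['=', '\\', '\\', '['],
  ['=', '\\', '\\', '{'],
  [')', '\\', '\\', '='],
  [']', '\\', '\\', '='],
  ['}', '\\', '\\', '='],
  [';', '\'', '('],
  [';', '('],
  [';', '\'', '['],
  [';', '['],
  [';', '\'', '{'],
  [';', '{'],
  [')', '\'', ';'],
  [')', ';'],
  [']', '\'', ';'],
  [']', ';'],
  ['}', '\'', ';'],
  ['}', ';'],
  [';', '`', '('],
  [';', '`', '['],
  [';', '`', '{'],
  [')', '`', ';'],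
  [']', '`', ';'],
  ['}', '`', ';'],
  [';', '-', '('],
  [';', '-', '['],
  [';', '-', '{'],
  [')', '-', ';'],
  [']', '-', ';'],
  ['}', '-', ';'],
  [';', '\\', '\\', '('],
  [';', '\\', '\\', '['],
  [';', '\\', '\\', '{'],
  [')', '\\', '\\', ';'],
  [']', '\\', '\\', ';'],
  ['}', '\\', '\\', ';']]

def pvLitNeutral : List (List Char) :=
 [['8', '\'', '|'],
  ['8', '|'],
  ['8', '\'', '/'],
  ['8', '/'],
  ['8', '\'', '\\', '\\'],
  ['8', '\\', '\\'],
  ['|', '\'', '8'],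
  ['|', '8'],
  ['/', '\'', '8'],
  ['/', '8'],
  ['\\', '\\', '\'', '8'],
  ['\\', '\\', '8'],
  ['8', '`', '|'],
  ['8', '`', '/'],
  ['8', '`', '\\', '\\'],
  ['|', '`', '8'],
  ['/', '`', '8'],
  ['\\', '\\', '`', '8'],
  ['8', '-', '|'],
  ['8', '-', '/'],
  ['8', '-', '\\', '\\'],
  ['|', '-', '8'],
  ['/', '-', '8'],
  ['\\', '\\', '-', '8'],
  ['8', '\\', '\\', '|'],
  ['8', '\\', '\\', '/'],
  ['8', '\\', '\\', '\\', '\\'],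
  ['|', '\\', '\\', '8'],
  ['/', '\\', '\\', '8'],
  ['\\', '\\', '\\', '\\', '8'],
  [':', '\'', '|'],
  [':', '|'],
  [':', '\'', '/'],
  [':', '/'],
  [':', '\'', '\\', '\\'],
  [':', '\\', '\\'],
  ['|', '\'', ':'],
  ['|', ':'],
  ['/', '\'', ':'],
  ['/', ':'],
  ['\\', '\\', '\'', ':'],
  ['\\', '\\', ':'],
  [':', '`', '|'],
  [':', '`', '/'],
  [':', '`', '\\', '\\'],
  ['|', '`', ':'],
  ['/', '`', ':'],
  ['\\', '\\', '`', ':'],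
  [':', '-', '|'],
  [':', '-', '/'],
  [':', '-', '\\', '\\'],
  ['|', '-', ':'],
  ['/', '-', ':'],
  ['\\', '\\', '-', ':'],
  [':', '\\', '\\', '|'],
  [':', '\\', '\\', '/'],
  [':', '\\', '\\', '\\', '\\'],
  ['|', '\\', '\\', ':'],
  ['/', '\\', '\\', ':'],
  ['\\', '\\', '\\', '\\', ':'],
  ['=', '\'', '|'],
  ['=', '|'],
  ['=', '\'', '/'],
  ['=', '/'],
  ['=', '\'', '\\', '\\'],
  ['=', '\\', '\\'],
  ['|', '\'', '='],
  ['|', '='],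
  ['/', '\'', '='],
  ['/', '='],
  ['\\', '\\', '\'', '='],
  ['\\', '\\', '='],
  ['=', '`', '|'],
  ['=', '`', '/'],
  ['=', '`', '\\', '\\'],
  ['|', '`', '='],
  ['/', '`', '='],
  ['\\', '\\', '`', '='],
  ['=', '-', '|'],
  ['=', '-', '/'],
  ['=', '-', '\\', '\\'],
  ['|', '-', '='],
  ['/', '-', '='],
  ['\\', '\\', '-', '='],
  ['=', '\\', '\\', '|'],
  ['=', '\\', '\\', '/'],
  ['=', '\\', '\\', '\\', '\\'],
  ['|', '\\', '\\', '='],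
  ['/', '\\', '\\', '='],
  ['\\', '\\', '\\', '\\', '='],
  [';', '\'', '|'],
  [';', '|'],
  [';', '\'', '/'],
  [';', '/'],
  [';', '\'', '\\', '\\'],
  [';', '\\', '\\'],
  ['|', '\'', ';'],
  ['|', ';'],
  ['/', '\'', ';'],
  ['/', ';'],
  ['\\', '\\', '\'', ';'],
  ['\\', '\\', ';'],
  [';', '`', '|'],
  [';', '`', '/'],
  [';', '`', '\\', '\\'],
  ['|', '`', ';'],
  ['/', '`', ';'],
  ['\\', '\\', '`', ';'],
  [';', '-', '|'],
  [';', '-', '/'],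
  [';', '-', '\\', '\\'],
  ['|', '-', ';'],
  ['/', '-', ';'],
  ['\\', '\\', '-', ';'],
  [';', '\\', '\\', '|'],
  [';', '\\', '\\', '/'],
  [';', '\\', '\\', '\\', '\\'],
  ['|', '\\', '\\', ';'],
  ['/', '\\', '\\', ';'],
  ['\\', '\\', '\\', '\\', ';']]


-- the evaluated fold constants of A (one kernel evaluation each)
set_option maxRecDepth 100000 in
theorem pvSmileA_eq : pvSmileA = pvLitSmile := by decide
set_option maxRecDepth 100000 in
theorem pvSadA_eq : pvSadA = pvLitSad := by decide
set_option maxRecDepth 100000 in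
theorem pvNeutralA_eq : pvNeutralA = pvLitNeutral := by decide

-- all words B's parser accepts for a given mouth pair, written as one flatMap expression
def pvGen (right left : List (List Char)) : List (List Char) :=
  (pvEyesB.flatMap fun e =>
      (pvNosesB.flatMap fun n => right.map fun m => e :: (n ++ m)) ++ right.map fun m => e :: m)
  ++ left.flatMap fun m =>
      (pvNosesB.flatMap fun n => pvEyeToksB.map fun r => m ++ n ++ r) ++ pvEyeToksB.map fun r => m ++ r

theorem pvAfterNose_any (s : List Char) (P : List Char → Bool) :
    (pvAfterNose s).any P = true ↔
      P s = true ∨ ∃ n ∈ pvNosesB, ∃ t, s = n ++ t ∧ P t = true := by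
  simp only [pvAfterNose, List.any_cons, Bool.or_eq_true, List.any_eq_true, List.mem_filterMap]
  constructor
  · rintro (h | ⟨r, ⟨n, hn, hr⟩, hP⟩)
    · exact .inl h
    · split_ifs at hr with hpre
      · obtain ⟨t, ht⟩ := List.isPrefixOf_iff_prefix.mp hpre
        obtain rfl := Option.some.inj hr
        refine .inr ⟨n, hn, t, ht.symm, ?_⟩
        rwa [← ht, List.drop_left] at hP
  · rintro (h | ⟨n, hn, t, rfl, hP⟩)
    · exact .inl h
    · refine .inr ⟨t, ⟨n, hn, ?_⟩, hP⟩
      rw [if_pos (List.isPrefixOf_iff_prefix.mpr ⟨t, rfl⟩), List.drop_left]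
theorem pvRev_iff (w m : List Char) :
    (m.isPrefixOf w && (pvAfterNose (w.drop m.length)).any (fun r => pvEyeToksB.contains r)) = true
    ↔ (∃ n ∈ pvNosesB, ∃ r ∈ pvEyeToksB, w = m ++ n ++ r) ∨ ∃ r ∈ pvEyeToksB, w = m ++ r := by
  rw [Bool.and_eq_true, pvAfterNose_any]
  simp only [List.contains_iff_mem]
  constructor
  · rintro ⟨hpre, h⟩
    obtain ⟨u, hu⟩ := List.isPrefixOf_iff_prefix.mp hpre
    have hd : w.drop m.length = u := by rw [← hu, List.drop_left]
    rw [hd] at h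
    rcases h with h | ⟨n, hn, t, ht, hr⟩
    · exact .inr ⟨u, h, hu.symm⟩
    · exact .inl ⟨n, hn, t, hr, by rw [← hu, ht, List.append_assoc]⟩
  · rintro (⟨n, hn, r, hr, rfl⟩ | ⟨r, hr, rfl⟩)
    · refine ⟨List.isPrefixOf_iff_prefix.mpr ⟨n ++ r, by simp⟩, .inr ⟨n, hn, r, ?_, hr⟩⟩
      rw [List.append_assoc, List.drop_left]
    · exact ⟨List.isPrefixOf_iff_prefix.mpr ⟨r, rfl⟩, .inl (by rw [List.drop_left]; exact hr)⟩
theorem pvIsFace_iff (w : List Char) (right left : List (List Char)) :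
    pvIsFace w right left = true ↔ w ∈ pvGen right left := by
  unfold pvIsFace pvGen
  rw [Bool.or_eq_true]
  cases w with
  | nil =>
    simp only [List.any_eq_true, pvRev_iff, List.mem_append, List.mem_flatMap, List.mem_map]
    constructor
    · rintro (h | ⟨m, hm, (⟨n, hn, r, hr, habs⟩ | ⟨r, hr, habs⟩)⟩)
      · exact absurd h (by simp)
      · exact .inr ⟨m, hm, .inl ⟨n, hn, r, hr, habs.symm⟩⟩
      · exact .inr ⟨m, hm, .inr ⟨r, hr, habs.symm⟩⟩
    · rintro (⟨e, he, (⟨n, hn, m, hm, habs⟩ | ⟨m, hm, habs⟩)⟩ | ⟨m, hm, (⟨n, hn, r, hr, habs⟩ | ⟨r, hr, habs⟩)⟩)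
      · exact absurd habs (by simp)
      · exact absurd habs (by simp)
      · exact .inr ⟨m, hm, .inl ⟨n, hn, r, hr, habs.symm⟩⟩
      · exact .inr ⟨m, hm, .inr ⟨r, hr, habs.symm⟩⟩
  | cons c body =>
    rw [Bool.and_eq_true, pvAfterNose_any]
    simp only [List.any_eq_true, pvRev_iff, List.contains_iff_mem, List.mem_append,
      List.mem_flatMap, List.mem_map, List.cons.injEq]
    constructor
    · rintro (⟨hc, (h | ⟨n, hn, t, rfl, ht⟩)⟩ | ⟨m, hm, (⟨n, hn, r, hr, hw⟩ | ⟨r, hr, hw⟩)⟩)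
      · exact .inl ⟨c, hc, .inr ⟨body, h, rfl, rfl⟩⟩
      · exact .inl ⟨c, hc, .inl ⟨n, hn, t, ht, rfl, rfl⟩⟩
      · exact .inr ⟨m, hm, .inl ⟨n, hn, r, hr, hw.symm⟩⟩
      · exact .inr ⟨m, hm, .inr ⟨r, hr, hw.symm⟩⟩
    · rintro (⟨e, he, (⟨n, hn, m, hm, rfl, hb⟩ | ⟨m, hm, rfl, hb⟩)⟩ | ⟨m, hm, (⟨n, hn, r, hr, hw⟩ | ⟨r, hr, hw⟩)⟩)
      · exact .inl ⟨he, .inr ⟨n, hn, m, hb.symm, hm⟩⟩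
      · exact .inl ⟨he, .inl (hb ▸ hm)⟩
      · exact .inr ⟨m, hm, .inl ⟨n, hn, r, hr, hw.symm⟩⟩
      · exact .inr ⟨m, hm, .inr ⟨r, hr, hw.symm⟩⟩

-- membership in the generated lists coincides with membership in A's literal face lists
set_option maxRecDepth 100000 in
theorem pvGenSmile_sub : ∀ x ∈ pvGen pvSmileR pvSmileL, x ∈ pvLitSmile := by decide
set_option maxRecDepth 100000 in
theorem pvLitSmile_sub : ∀ x ∈ pvLitSmile, x ∈ pvGen pvSmileR pvSmileL := by decide
set_option maxRecDepth 100000 in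
theorem pvGenNeut_sub : ∀ x ∈ pvGen pvNeutM pvNeutM, x ∈ pvLitNeutral := by decide
set_option maxRecDepth 100000 in
theorem pvLitNeut_sub : ∀ x ∈ pvLitNeutral, x ∈ pvGen pvNeutM pvNeutM := by decide
set_option maxRecDepth 100000 in
theorem pvGenSad_sub : ∀ x ∈ pvGen pvSadR pvSadL, x ∈ pvLitSad := by decide
set_option maxRecDepth 100000 in
theorem pvLitSad_sub : ∀ x ∈ pvLitSad, x ∈ pvGen pvSadR pvSadL := by decide

theorem pvFace_eq_contains (l : List Char) (R L lit : List (List Char))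
    (h1 : ∀ x ∈ pvGen R L, x ∈ lit) (h2 : ∀ x ∈ lit, x ∈ pvGen R L) :
    pvIsFace l R L = lit.contains l := by
  rw [Bool.eq_iff_iff, pvIsFace_iff, List.contains_iff_mem]
  exact ⟨h1 l, h2 l⟩

theorem pvPerWord (w : String) : pvTransA w = pvTransB w := by
  unfold pvTransA pvTransB
  rw [pvSmileA_eq, pvNeutralA_eq, pvSadA_eq,
    pvFace_eq_contains _ _ _ _ pvGenSmile_sub pvLitSmile_sub,
    pvFace_eq_contains _ _ _ _ pvGenNeut_sub pvLitNeut_sub,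
    pvFace_eq_contains _ _ _ _ pvGenSad_sub pvLitSad_sub]
  rfl

-- ===== VERDICT (by name: the statement is the Claim_ definition above) =====
theorem emoji_native_translation_spec : Claim_equal_emoji_native_translation := by
  intro text _
  unfold Spec_emoji_native_translation emoji_native_translation emoji_native_translation_alt
  rw [List.map_congr_left (fun w _ => pvPerWord w)]
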